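-- pv_equiv track=rewrite | github.com/gabrielaeescobar/LYM-p0 | modelo.py | verify_proc
-- ===== SOURCE A (Python) =====
-- alfabeto = 'abcdefghijklmnopqrstuvwxyz'
--
-- def nombre_correcto(nombre):
--     check = True
--     for caracter in nombre:
--         if caracter not in alfabeto:
--             check = False
--             break
--     return check
--
-- def verify_proc(tokens):
--     lista_variables_temporales_proc = []
--     check = True
--     checked_nombre = False
--     checked_parentesis = [False, False]
--
--     i = 1
--     while i < len(tokens):
--         token = tokens[i]
--         if not checked_nombre:
--             nombre = token
--             check = nombre_correcto(nombre)
--             checked_nombre = True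
--
--         elif not checked_parentesis[0]:
--             parn_izq = token
--             if parn_izq != '(':
--                 check = False
--             else:
--                 checked_parentesis[0]=True
--
--
--         elif not checked_parentesis[1]:
--             if token == ')':
--                 checked_parentesis[1] == True
--                 return True, tokens[i:], lista_variables_temporales_proc
--
--             elif len(tokens[i:])>=2:
--                 if nombre_correcto(tokens[i]) == True and tokens[i+1] ==',':
--                     lista_variables_temporales_proc.append(tokens[i])
--
--                 elif nombre_correcto(tokens[i]) == True and tokens[i+1] ==')':
--                     lista_variables_temporales_proc.append(tokens[i])
--                     checked_parentesis[1] == True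
--                     i+=2
--                     return True, tokens[i:], lista_variables_temporales_proc
--                 else:
--
--                     check = False
--
--                 i+=1 # SOLAMENTE PORQUE SON PAREJITAS
--
--         if check == False:
--             return False, tokens[i:], lista_variables_temporales_proc
--         i+=1
--
--     check_final = checked_nombre and checked_parentesis[0] and checked_parentesis[1]
--     return check_final, tokens[i:], lista_variables_temporales_proc
-- ===== SOURCE B (Python) =====
-- alfabeto = 'abcdefghijklmnopqrstuvwxyz'
--
-- def nombre_correcto(nombre):
--     return all(c in alfabeto for c in nombre)
--
-- def verify_proc(tokens):
--     n = len(tokens)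
--     if n < 2:
--         return False, tokens[1:], []
--     if not nombre_correcto(tokens[1]):
--         return False, tokens[1:], []
--     if n < 3 or tokens[2] != '(':
--         return False, tokens[2:], []
--     variables = []
--     i = 3
--     while i < n:
--         if tokens[i] == ')':
--             return True, tokens[i:], variables
--         if n - i >= 2:
--             if nombre_correcto(tokens[i]) and tokens[i + 1] == ',':
--                 variables.append(tokens[i])
--                 i += 2
--             elif nombre_correcto(tokens[i]) and tokens[i + 1] == ')':
--                 variables.append(tokens[i])
--                 return True, tokens[i + 2:], variables
--             else:
--                 return False, tokens[i + 1:], variables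
--         else:
--             return False, [], variables
--     return False, [], variables
-- ===== Notes on version B (the rewrite author's own statement) =====
-- stated objective: simpler
-- what changed: Replaced A's flag-based while-loop state machine (check/checked_nombre/checked_parentesis flags, variable increments, a dead checked_parentesis[1]=='==' flag) with a phased parser: explicit early-return checks for the name and '(' followed by a plain loop consuming (variable, separator) pairs.
import Mathlib
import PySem

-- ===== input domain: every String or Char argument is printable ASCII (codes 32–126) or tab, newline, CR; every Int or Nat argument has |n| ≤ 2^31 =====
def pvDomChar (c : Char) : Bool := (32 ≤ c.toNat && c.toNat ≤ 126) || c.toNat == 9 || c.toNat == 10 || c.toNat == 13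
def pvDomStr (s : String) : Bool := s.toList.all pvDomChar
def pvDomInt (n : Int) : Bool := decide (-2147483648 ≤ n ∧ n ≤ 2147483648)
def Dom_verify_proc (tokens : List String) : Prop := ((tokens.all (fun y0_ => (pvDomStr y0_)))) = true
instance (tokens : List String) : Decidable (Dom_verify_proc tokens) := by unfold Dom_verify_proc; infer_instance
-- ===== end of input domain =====

-- B replaces A's flag-based while-loop state machine by a phased parser with early returns (objective: simpler).

-- ===== PORT A =====
def alfabeto : List Char := "abcdefghijklmnopqrstuvwxyz".toList

-- literal port of nombre_correcto: scan with a check flag and break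
def nombre_go : List Char → Bool
  | [] => true
  | c :: rest => if !(alfabeto.contains c) then false else nombre_go rest

def nombre_correcto (nombre : String) : Bool := nombre_go nombre.toList

-- the while loop of A, carrying its mutable state (check is True at every loop entry;
-- checked_parentesis[1] is only ever compared with '==', never assigned, so cp1 stays False)
def loopA (tokens : List String) (i : Nat) (vars : List String)
    (checked_nombre cp0 cp1 : Bool) : Bool × List String × List String :=
  if h : i < tokens.length then
    let token := tokens.getD i ""
    if !checked_nombre then
      let check := nombre_correcto token
      if check = false then (false, tokens.drop i, vars)
      else loopA tokens (i+1) vars true cp0 cp1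
    else if !cp0 then
      if token ≠ "(" then (false, tokens.drop i, vars)
      else loopA tokens (i+1) vars checked_nombre true cp1
    else if !cp1 then
      if token = ")" then (true, tokens.drop i, vars)
      else if (tokens.drop i).length ≥ 2 then
        if nombre_correcto (tokens.getD i "") && (tokens.getD (i+1) "" = ",") then
          loopA tokens (i+2) (vars ++ [tokens.getD i ""]) checked_nombre cp0 cp1
        else if nombre_correcto (tokens.getD i "") && (tokens.getD (i+1) "" = ")") then
          (true, tokens.drop (i+2), vars ++ [tokens.getD i ""])
        else (false, tokens.drop (i+1), vars)
      else loopA tokens (i+1) vars checked_nombre cp0 cp1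
    else loopA tokens (i+1) vars checked_nombre cp0 cp1
  else (checked_nombre && cp0 && cp1, tokens.drop i, vars)
termination_by tokens.length - i
decreasing_by all_goals omega

def verify_proc (tokens : List String) : Bool × List String × List String :=
  loopA tokens 1 [] false false false

-- ===== PORT B =====
def loopB (tokens : List String) (i : Nat) (vars : List String) :
    Bool × List String × List String :=
  if h : i < tokens.length then
    if tokens.getD i "" = ")" then (true, tokens.drop i, vars)
    else if tokens.length - i ≥ 2 then
      if nombre_correcto (tokens.getD i "") && (tokens.getD (i+1) "" = ",") then
        loopB tokens (i+2) (vars ++ [tokens.getD i ""])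
      else if nombre_correcto (tokens.getD i "") && (tokens.getD (i+1) "" = ")") then
        (true, tokens.drop (i+2), vars ++ [tokens.getD i ""])
      else (false, tokens.drop (i+1), vars)
    else (false, [], vars)
  else (false, [], vars)
termination_by tokens.length - i
decreasing_by all_goals omega

def verify_proc_alt (tokens : List String) : Bool × List String × List String :=
  if tokens.length < 2 then (false, tokens.drop 1, [])
  else if !nombre_correcto (tokens.getD 1 "") then (false, tokens.drop 1, [])
  else if tokens.length < 3 || tokens.getD 2 "" ≠ "(" then (false, tokens.drop 2, [])
  else loopB tokens 3 []

-- ===== PRECONDITION & SPEC =====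
def Spec_verify_proc (tokens : List String) (out : Bool × List String × List String) : Prop := out = verify_proc_alt tokens
instance (tokens : List String) (out : Bool × List String × List String) : Decidable (Spec_verify_proc tokens out) := by unfold Spec_verify_proc; infer_instance

-- ===== CLAIM (what is proved, stated in full; the proofs are below) =====
def Claim_equal_verify_proc : Prop := ∀ (tokens : List String), Dom_verify_proc tokens → Spec_verify_proc tokens (verify_proc tokens)

-- ===== LEMMAS AND PROOFS =====

-- Once the name and '(' are consumed, A's loop and B's loop coincide.
theorem loopA_eq_loopB (tokens : List String) (i : Nat) (vars : List String) :
    loopA tokens i vars true true false = loopB tokens i vars := by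
  by_cases h : i < tokens.length
  · rw [loopA, loopB]
    by_cases hp : tokens[i] = ")"
    · simp [h, hp, List.getD]
    · by_cases h2 : 2 ≤ tokens.length - i
      · by_cases hc : nombre_correcto tokens[i] = true ∧ tokens[i+1]?.getD "" = ","
        · have := loopA_eq_loopB tokens (i+2) (vars ++ [tokens[i]])
          simp [h, hp, h2, hc, List.getD, this]
        · simp [h, hp, h2, hc, List.getD]
      · have hi1 : ¬ (i + 1 < tokens.length) := by omega
        have hd : tokens.drop (i+1) = [] := List.drop_eq_nil_of_le (by omega)
        rw [loopA]
        simp [h, hp, h2, hi1, hd, List.getD]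
  · rw [loopA, loopB]
    simp [h]
    omega
termination_by tokens.length - i
decreasing_by omega

-- ===== VERDICT (by name: the statement is the Claim_ definition above) =====
theorem verify_proc_spec : Claim_equal_verify_proc := by
  intro tokens _
  unfold Spec_verify_proc verify_proc verify_proc_alt
  by_cases h1 : 1 < tokens.length
  · rw [loopA]
    by_cases hn : nombre_correcto tokens[1] = false
    · simp [h1, hn, List.getD, show ¬ tokens.length < 2 by omega, List.drop_one]
    · rw [loopA]
      by_cases h2 : 2 < tokens.length
      · by_cases hp : tokens[2] = "("
        · simp [h1, h2, hn, hp, List.getD, show ¬ tokens.length < 2 by omega,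
            show ¬ tokens.length < 3 by omega, loopA_eq_loopB]
        · simp [h1, h2, hn, hp, List.getD, show ¬ tokens.length < 2 by omega]
      · have hd : tokens.drop 2 = [] := List.drop_eq_nil_of_le (by omega)
        simp [h1, h2, hn, hd, List.getD, show ¬ tokens.length < 2 by omega,
          show tokens.length < 3 by omega]
  · rw [loopA]
    simp [h1, show tokens.length < 2 by omega, List.drop_one]
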